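-- pv_equiv track=rewrite | github.com/rs-bruno/Diccionario | extraer_palabras.py | limpiar_lista
-- ===== SOURCE A (Python) =====
-- def femeninizar(pre, suff):
--     if suff.endswith('a'):
--         first_suff = suff[0]
--         if first_suff == 'a':
--             if pre[len(pre)-1] == 'o':
--                 pre = pre[:len(pre)-1] + 'a'
--             else:
--                 pre + 'a'
--         else: #busco la ultima ocurrencia de la primera letra del suffijo en el prefijo.
--             ind = len(pre) - 1
--             while ind > 0 and pre[ind] != first_suff:
--                 ind = ind - 1
--             pre = pre[:ind] + suff
--     else: #endswith('triz')
--         pre = pre[:len(pre)-3] + suff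
--     return pre
--
-- def limpiar_lista(lista_palabras):
--     '''Se eliminan los 1 y 2, se elimina lo que está despues de las comas, y se agregan las formas femeninas de los sustantivos.'''
--     filtro1 = []
--     for p1 in lista_palabras:
--         one = p1.find('1')
--         if one > 0:
--             filtro1.append(p1.replace('1', ''))
--         else:
--             filtro1.append(p1)
--     filtro2 = []
--     for p2 in filtro1:
--         two = p2.find('2')
--         if two > 0:
--             filtro2.append(p2.replace('2', ''))
--         else:
--             filtro2.append(p2)
--     filtro_spaces = []
--     for ps in filtro2:
--         filtro_spaces.append(ps.replace(' ', ''))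
--     proc_commas = []
--     for pc in filtro_spaces:
--         if pc.count(',') > 0:
--             aux_list = pc.split(',')
--             if aux_list[1].endswith('a') or aux_list[1].endswith('triz'):
--                 fem = femeninizar(*aux_list)
--                 proc_commas.append(fem)
--                 proc_commas.append(aux_list[0])
--             else:
--                 proc_commas.append(aux_list[0])
--         else:
--             proc_commas.append(pc)
--     res = []
--     for r in proc_commas:
--         if r.isalpha():
--             res.append(r)
--     final_res = []
--     for i in range(1, len(res)-1): #saca palabras "coladas"
--         if (res[i])[0] == (res[i-1])[0] or (res[i])[0] == (res[i+1])[0]: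
--             final_res.append(res[i])
--     final_res = sorted(set(final_res))
--     return final_res
-- ===== SOURCE B (Python) =====
-- # B: one emission pass producing the cleaned/feminized words, then a RUN-based
-- # "coladas" filter: group res into maximal runs of words sharing a first letter;
-- # only members of runs of length >= 2 survive A's neighbor test, minus the
-- # positional first/last element.  A's dead `pre + 'a'` statement makes the
-- # non-'o' case of the 'a'-suffix branch a no-op; B reproduces that behaviour.
-- def _femenino(pre, suf):
--     if suf.endswith('triz'):
--         return pre[:len(pre) - 3] + suf
--     if suf[0] == 'a':
--         return pre[:-1] + 'a' if pre.endswith('o') else pre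
--     i = 0
--     for j in range(1, len(pre)):   # last occurrence of suf[0] at index >= 1, else 0
--         if pre[j] == suf[0]:
--             i = j
--     return pre[:i] + suf
--
-- def _emit(w):
--     if w.find('1') > 0:
--         w = w.replace('1', '')
--     if w.find('2') > 0:
--         w = w.replace('2', '')
--     w = w.replace(' ', '')
--     if ',' in w:
--         parts = w.split(',')
--         pre, suf = parts[0], parts[1]
--         if suf.endswith('a') or suf.endswith('triz'):
--             out = [_femenino(pre, suf), pre]
--         else:
--             out = [pre]
--     else:
--         out = [w]
--     return [c for c in out if c.isalpha()]
--
-- def limpiar_lista(lista_palabras):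
--     res = [c for w in lista_palabras for c in _emit(w)]
--     n = len(res)
--     kept = []
--     i = 0
--     while i < n:                       # i = start of a maximal run of equal initials
--         c = res[i][0]
--         j = i + 1
--         while j < n and res[j][0] == c:
--             j += 1                     # j = end of the run
--         if j - i >= 2:                 # singleton runs never pass the neighbor test
--             kept.extend(res[k] for k in range(i, j) if 0 < k < n - 1)
--         i = j
--     return sorted(set(kept))
-- ===== Notes on version B (the rewrite author's own statement) =====
-- stated objective: alternative
-- what changed: The index/neighbor 'coladas' filter (res[i][0] compared with res[i-1][0] and res[i+1][0] for every inner i) is replaced by a run-decomposition: res is partitioned into maximal runs of words sharing a first letter and exactly the members of runs of length >= 2 (minus the positional first/last word) are kept; the five cleaning passes are also fused into one per-word emission pass, and femeninizar's backward while-search becomes a forward last-occurrence scan.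
import Mathlib
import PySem

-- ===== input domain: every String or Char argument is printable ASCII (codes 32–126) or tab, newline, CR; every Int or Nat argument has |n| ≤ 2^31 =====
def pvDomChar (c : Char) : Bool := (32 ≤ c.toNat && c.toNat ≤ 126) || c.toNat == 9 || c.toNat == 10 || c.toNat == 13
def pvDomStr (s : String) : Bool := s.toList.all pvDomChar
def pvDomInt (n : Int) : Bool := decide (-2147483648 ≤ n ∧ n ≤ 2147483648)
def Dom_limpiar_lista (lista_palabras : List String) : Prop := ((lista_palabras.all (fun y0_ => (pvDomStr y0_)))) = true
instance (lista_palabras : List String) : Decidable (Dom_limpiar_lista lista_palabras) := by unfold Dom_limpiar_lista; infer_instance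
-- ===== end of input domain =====

-- B replaces A's index/neighbor "coladas" filter by a run decomposition (maximal runs of
-- equal first letters; members of runs of length ≥ 2, minus the positional first/last word),
-- fuses the five cleaning passes into one emission pass and femeninizar's backward while
-- into a forward scan.  Both ports work on the words' character lists (`String.toList`).

-- ===== PORT A =====
-- while ind > 0 and pre[ind] != first: ind = ind - 1   (returns the final ind)
def pvBuscarA (pre : List Char) (first : Char) (ind : Int) : Int :=
  if h : 0 < ind then
    (if PySem.List.pyGetD pre ind ' ' ≠ first then pvBuscarA pre first (ind - 1) else ind)
  else ind
termination_by ind.toNat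
decreasing_by omega

def pvFemA (pre suff : List Char) : List Char :=
  if PySem.Chars.endswith suff ['a'] then
    -- suff[0]: in range (suff ends with 'a', hence nonempty)
    let first := PySem.List.pyGetD suff 0 ' '
    if first = 'a' then
      match PySem.List.pyGet? pre (PySem.List.len pre - 1) with
      | some c =>
          if c = 'o' then
            PySem.List.slice pre none (some (PySem.List.len pre - 1)) ++ ['a']
          else pre             -- `pre + 'a'` in A is a discarded expression: no-op
      | none => pre            -- Python raises IndexError here (pre = ''); excluded by Pre_
    else
      let ind := pvBuscarA pre first (PySem.List.len pre - 1)
      PySem.List.slice pre none (some ind) ++ suff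
  else
    PySem.List.slice pre none (some (PySem.List.len pre - 3)) ++ suff

-- femeninizar(*aux_list) with the branch list; Python raises TypeError when aux_list
-- has more than two parts — those inputs are excluded by Pre_
def pvCommaA (pc : List Char) : List (List Char) :=
  if 0 < PySem.Chars.count pc [','] then
    let aux := PySem.Chars.splitOn pc [',']
    if PySem.Chars.endswith (PySem.List.pyGetD aux 1 []) ['a']
        || PySem.Chars.endswith (PySem.List.pyGetD aux 1 []) ['t','r','i','z'] then
      [pvFemA (PySem.List.pyGetD aux 0 []) (PySem.List.pyGetD aux 1 []), PySem.List.pyGetD aux 0 []]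
    else
      [PySem.List.pyGetD aux 0 []]
  else [pc]

def limpiar_lista (lista_palabras : List String) : List String :=
  let lp := lista_palabras.map String.toList
  let filtro1 := lp.foldl (fun acc p1 =>
    if 0 < PySem.Chars.find p1 ['1'] then acc ++ [PySem.Chars.replace p1 ['1'] []] else acc ++ [p1]) []
  let filtro2 := filtro1.foldl (fun acc p2 =>
    if 0 < PySem.Chars.find p2 ['2'] then acc ++ [PySem.Chars.replace p2 ['2'] []] else acc ++ [p2]) []
  let filtroSpaces := filtro2.foldl (fun acc ps => acc ++ [PySem.Chars.replace ps [' '] []]) []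
  let procCommas := filtroSpaces.foldl (fun acc pc => acc ++ pvCommaA pc) []
  let res := procCommas.foldl (fun acc r => if PySem.Chars.strIsalpha r then acc ++ [r] else acc) []
  -- res[i] etc. are in range for i in range(1, len(res)-1); res[i][0] in range (isalpha ⇒ nonempty)
  let finalRes := (PySem.List.pyRange 1 (PySem.List.len res - 1) 1).foldl (fun acc i =>
    if PySem.List.pyGetD (PySem.List.pyGetD res i []) 0 ' '
         = PySem.List.pyGetD (PySem.List.pyGetD res (i - 1) []) 0 ' '
       ∨ PySem.List.pyGetD (PySem.List.pyGetD res i []) 0 ' '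
         = PySem.List.pyGetD (PySem.List.pyGetD res (i + 1) []) 0 ' '
    then acc ++ [PySem.List.pyGetD res i []] else acc) []
  (PySem.List.sorted (PySem.Set.ofList finalRes) (fun x => x) false).map (fun cs => String.ofList cs)

-- ===== PORT B =====
-- last index j ≥ 1 with pre[j] = c, else 0 (the forward scan in _femenino)
def pvScanB (pre : List Char) (c : Char) : Int :=
  (PySem.List.pyRange 1 (PySem.List.len pre) 1).foldl
    (fun i j => if PySem.List.pyGetD pre j ' ' = c then j else i) 0

def pvFemB (pre suf : List Char) : List Char :=
  if PySem.Chars.endswith suf ['t','r','i','z'] then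
    PySem.List.slice pre none (some (PySem.List.len pre - 3)) ++ suf
  else if PySem.List.pyGetD suf 0 ' ' = 'a' then        -- suf[0]: suf ends with 'a'/'triz'
    (if PySem.Chars.endswith pre ['o'] then PySem.List.slice pre none (some (-1)) ++ ['a'] else pre)
  else
    PySem.List.slice pre none (some (pvScanB pre (PySem.List.pyGetD suf 0 ' '))) ++ suf

def pvEmitB (w0 : List Char) : List (List Char) :=
  let w1 := if 0 < PySem.Chars.find w0 ['1'] then PySem.Chars.replace w0 ['1'] [] else w0
  let w2 := if 0 < PySem.Chars.find w1 ['2'] then PySem.Chars.replace w1 ['2'] [] else w1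
  let w := PySem.Chars.replace w2 [' '] []
  let out :=
    if PySem.Chars.isIn [','] w then
      let parts := PySem.Chars.splitOn w [',']
      let pre := PySem.List.pyGetD parts 0 []
      let suf := PySem.List.pyGetD parts 1 []
      if PySem.Chars.endswith suf ['a'] || PySem.Chars.endswith suf ['t','r','i','z'] then
        [pvFemB pre suf, pre]
      else [pre]
    else [w]
  out.filter (fun c => PySem.Chars.strIsalpha c)

-- res[k][0]: every word in res is alpha, hence nonempty, so headD is exactly s[0]
def pvFirst (res : List (List Char)) (k : Nat) : Char := (res.getD k []).headD ' '

-- inner `while j < n and res[j][0] == c: j += 1`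
def pvRunEnd (res : List (List Char)) (c : Char) (j : Nat) : Nat :=
  if _h : j < res.length then
    if pvFirst res j = c then pvRunEnd res c (j + 1) else j
  else j
termination_by res.length - j

theorem pvRunEnd_ge (res : List (List Char)) (c : Char) (j : Nat) : j ≤ pvRunEnd res c j := by
  fun_induction pvRunEnd res c j with
  | case1 j h hc ih => omega
  | case2 j h hc => exact le_rfl
  | case3 j h => exact le_rfl

-- outer `while i < n:` — per run emit range(i, j) filtered by 0 < k < n-1 when the run
-- has length ≥ 2 (the `kept.extend(...)` comprehension)
def pvRunsB (res : List (List Char)) (i : Nat) : List (List Char) :=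
  if h : i < res.length then
    -- Python names the run end `j`; it is inlined here (the same value, computed where used)
    (if 2 ≤ pvRunEnd res (pvFirst res i) (i + 1) - i then
       ((List.range' i (pvRunEnd res (pvFirst res i) (i + 1) - i)).filter
          (fun k => decide (0 < k) && decide (k < res.length - 1))).map (fun k => res.getD k [])
     else [])
    ++ pvRunsB res (pvRunEnd res (pvFirst res i) (i + 1))
  else []
termination_by res.length - i
decreasing_by have := pvRunEnd_ge res (pvFirst res i) (i + 1); omega

def limpiar_lista_alt (lista_palabras : List String) : List String :=
  let res := (lista_palabras.map String.toList).flatMap pvEmitB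
  (PySem.List.sorted (PySem.Set.ofList (pvRunsB res 0)) (fun x => x) false).map
    (fun cs => String.ofList cs)

-- ===== PRECONDITION & SPEC =====
-- the cleaned form of a word (the 1/2/space passes), used only to state Pre_
def pvClean (w : List Char) : List Char :=
  let w1 := if 0 < PySem.Chars.find w ['1'] then PySem.Chars.replace w ['1'] [] else w
  let w2 := if 0 < PySem.Chars.find w1 ['2'] then PySem.Chars.replace w1 ['2'] [] else w1
  PySem.Chars.replace w2 [' '] []

def pvWordOK (w : List Char) : Bool :=
  let parts := PySem.Chars.splitOn (pvClean w) [',']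
  let s1 := PySem.List.pyGetD parts 1 []
  !((2 < parts.length && (PySem.Chars.endswith s1 ['a'] || PySem.Chars.endswith s1 ['t','r','i','z']))
    || (parts.length == 2 && PySem.List.pyGetD parts 0 [] == ([] : List Char)
        && PySem.Chars.endswith s1 ['a'] && PySem.List.pyGetD s1 0 ' ' == 'a'))

-- Pre_ excludes exactly the inputs on which Python A raises: a cleaned word with ≥ 2 commas whose
-- second segment ends in 'a'/'triz' (TypeError in femeninizar(*aux_list)), or a cleaned word
-- ',suf' with suf starting and ending in 'a' (IndexError on pre[len(pre)-1] with pre = '').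
def Pre_limpiar_lista (lista_palabras : List String) : Prop :=
  (lista_palabras.all (fun w => pvWordOK w.toList)) = true
instance (lista_palabras : List String) : Decidable (Pre_limpiar_lista lista_palabras) := by
  unfold Pre_limpiar_lista; infer_instance

def pvWitness_limpiar_lista : List String := ["ab"]

def Spec_limpiar_lista (lista_palabras : List String) (out : List String) : Prop :=
  out = limpiar_lista_alt lista_palabras
instance (lista_palabras : List String) (out : List String) : Decidable (Spec_limpiar_lista lista_palabras out) := by
  unfold Spec_limpiar_lista; infer_instance

-- ===== CLAIM (what is proved, stated in full; the proofs are below) =====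
def Claim_equal_limpiar_lista : Prop := ∀ (lista_palabras : List String), Dom_limpiar_lista lista_palabras → Pre_limpiar_lista lista_palabras → Spec_limpiar_lista lista_palabras (limpiar_lista lista_palabras)

-- ===== LEMMAS AND PROOFS =====

theorem pv_go_le (sub : List Char) : ∀ (fuel : Nat) (s : List Char) (acc : Nat),
    acc ≤ PySem.Chars.count.go sub fuel s acc := by
  intro fuel
  induction fuel with
  | zero => intro s acc; rw [PySem.Chars.count.go.eq_1]
  | succ n ih =>
    intro s acc
    cases s with
    | nil => rw [PySem.Chars.count.go.eq_2 sub (n+1) acc (by omega)]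
    | cons h t =>
      rw [PySem.Chars.count.go.eq_3]
      split
      · exact le_trans (Nat.le_succ acc) (ih _ _)
      · exact ih _ _

theorem pv_go_eq_acc_iff (sub : List Char) (hsub : sub ≠ []) :
    ∀ (fuel : Nat) (s : List Char) (acc : Nat), s.length ≤ fuel →
    (PySem.Chars.count.go sub fuel s acc = acc ↔ ∀ j, ¬ sub <+: s.drop j) := by
  intro fuel
  induction fuel with
  | zero =>
    intro s acc hf
    have hs : s = [] := List.eq_nil_of_length_eq_zero (by omega)
    subst hs
    rw [PySem.Chars.count.go.eq_1]
    simp [List.drop_nil, List.prefix_nil, hsub]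
  | succ n ih =>
    intro s acc hf
    cases s with
    | nil =>
      rw [PySem.Chars.count.go.eq_2 sub (n+1) acc (by omega)]
      simp [List.drop_nil, List.prefix_nil, hsub]
    | cons h t =>
      rw [PySem.Chars.count.go.eq_3]
      split
      · rename_i hpre
        constructor
        · intro heq
          have h1 := pv_go_le sub n (List.drop sub.length (h :: t)) (acc + 1)
          omega
        · intro hall
          exact absurd (List.isPrefixOf_iff_prefix.mp hpre) (by simpa using hall 0)
      · rename_i hpre
        rw [ih t acc (by simp at hf ⊢; omega)]
        constructor
        · intro hall j
          cases j with
          | zero =>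
            simp only [List.drop_zero]
            intro hp
            exact hpre (List.isPrefixOf_iff_prefix.mpr hp)
          | succ k => simpa using hall k
        · intro hall j
          simpa using hall (j + 1)

theorem pv_count_pos_iff (s sub : List Char) (h : sub ≠ []) :
    0 < PySem.Chars.count s sub ↔ PySem.Chars.isIn sub s = true := by
  have hne : sub.isEmpty = false := by simpa [List.isEmpty_iff]
  rw [← PySem.Chars.exists_prefix_drop_iff_isIn]
  unfold PySem.Chars.count
  rw [hne]
  simp only [Bool.false_eq_true, if_false]
  rw [Nat.pos_iff_ne_zero]
  constructor
  · intro hne0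
    by_contra hno
    push Not at hno
    exact hne0 ((pv_go_eq_acc_iff sub h s.length s 0 le_rfl).mpr (by simpa using hno))
  · rintro ⟨j, hj⟩ h0
    exact (pv_go_eq_acc_iff sub h s.length s 0 le_rfl).mp h0 j hj

theorem pv_suffix_singleton (x c : Char) (ys : List Char) :
    [x] <:+ ys ++ [c] ↔ x = c := by
  constructor
  · rintro ⟨t, ht⟩
    have := congrArg List.getLast? ht
    simpa using this
  · rintro rfl; exact ⟨ys, rfl⟩

theorem pv_a_not_triz (suf : List Char) (ha : PySem.Chars.endswith suf ['a'] = true) :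
    PySem.Chars.endswith suf ['t','r','i','z'] = false := by
  rw [PySem.Chars.endswith_iff] at ha
  by_contra hb
  rw [Bool.not_eq_false, PySem.Chars.endswith_iff] at hb
  obtain ⟨t, rfl⟩ := hb
  rw [show t ++ ['t','r','i','z'] = (t ++ ['t','r','i']) ++ ['z'] by simp] at ha
  exact absurd ((pv_suffix_singleton _ _ _).mp ha) (by decide)

theorem pv_buscar_eq_scan (pre : List Char) (c : Char) : ∀ (m : Nat),
    pvBuscarA pre c (m : Int)
      = (PySem.List.pyRange 1 ((m : Int) + 1) 1).foldl
          (fun i j => if PySem.List.pyGetD pre j ' ' = c then j else i) 0 := by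
  intro m
  induction m with
  | zero =>
    rw [pvBuscarA, PySem.List.pyRange_one_eq_nil (by norm_num)]
    simp
  | succ n ih =>
    have h1 : ((n+1 : Nat) : Int) = (n : Int) + 1 := by push_cast; ring
    rw [h1, pvBuscarA, dif_pos (by omega : (0:Int) < (n:Int)+1)]
    rw [PySem.List.pyRange_one_succ_right (by omega : (1:Int) ≤ (n:Int)+1), List.foldl_append]
    simp only [List.foldl_cons, List.foldl_nil]
    have h2 : ((n:Int)+1-1) = (n:Int) := by ring
    rw [h2]
    by_cases hc : PySem.List.pyGetD pre ((n : Int) + 1) ' ' = c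
    · rw [if_neg (not_not_intro hc), if_pos hc]
    · rw [if_pos hc, if_neg hc]
      exact ih

theorem pv_slice_buscar_eq_scan (pre : List Char) (c : Char) :
    PySem.List.slice pre none (some (pvBuscarA pre c (PySem.List.len pre - 1)))
      = PySem.List.slice pre none (some (pvScanB pre c)) := by
  cases pre with
  | nil => simp [PySem.List.slice, pvScanB, pvBuscarA, PySem.List.len]
  | cons h t =>
    have hlen : PySem.List.len (h :: t) - 1 = ((t.length : Nat) : Int) := by
      simp [PySem.List.len_eq]
    have hlen2 : PySem.List.len (h :: t) = ((t.length : Nat) : Int) + 1 := by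
      simp [PySem.List.len_eq]
    rw [hlen, pv_buscar_eq_scan, pvScanB, hlen2]

theorem pv_fem_eq (pre suf : List Char)
    (h : (PySem.Chars.endswith suf ['a'] || PySem.Chars.endswith suf ['t','r','i','z']) = true) :
    pvFemA pre suf = pvFemB pre suf := by
  rcases Bool.or_eq_true_iff.mp h with ha | htr
  · -- ends with 'a'
    have htz := pv_a_not_triz suf ha
    rw [pvFemA, pvFemB, if_pos ha, htz]
    simp only [Bool.false_eq_true, if_false]
    by_cases hf : PySem.List.pyGetD suf 0 ' ' = 'a'
    · rw [if_pos hf, if_pos hf]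
      rcases List.eq_nil_or_concat pre with rfl | ⟨ys, c, rfl⟩
      · have : PySem.List.pyGet? ([] : List Char) (PySem.List.len ([] : List Char) - 1) = none := by
          simp [PySem.List.len, PySem.List.pyGet?]
        rw [this]
        have : PySem.Chars.endswith ([] : List Char) ['o'] = false := by decide
        rw [this]
        simp
      · simp only [List.concat_eq_append]
        have hlen : PySem.List.len (ys ++ [c]) - 1 = ((ys.length : Nat) : Int) := by
          simp [PySem.List.len_eq]
        rw [hlen]
        have hget : PySem.List.pyGet? (ys ++ [c]) ((ys.length : Nat) : Int) = some c := by
          rw [PySem.List.pyGet?_natCast]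
          simp
        rw [hget]
        dsimp only
        by_cases hco : c = 'o'
        · subst hco
          have ho : PySem.Chars.endswith (ys ++ ['o']) ['o'] = true := by
            rw [PySem.Chars.endswith_iff]; exact ⟨ys, rfl⟩
          rw [PySem.List.slice_to_natCast, PySem.List.slice_to_neg_one]
          simp [ho]
        · have ho : PySem.Chars.endswith (ys ++ [c]) ['o'] = false := by
            rw [Bool.eq_false_iff]
            intro hx
            rw [PySem.Chars.endswith_iff] at hx
            exact hco ((pv_suffix_singleton 'o' c ys).mp hx).symm
          simp [ho, hco]
    · rw [if_neg hf, if_neg hf]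
      rw [pv_slice_buscar_eq_scan]
  · -- ends with "triz": not with 'a'
    have ha : PySem.Chars.endswith suf ['a'] = false := by
      rw [Bool.eq_false_iff]
      intro hx
      exact absurd (pv_a_not_triz suf hx) (by simp [htr])
    rw [pvFemA, pvFemB, ha, if_pos htr]
    simp

theorem pv_emit_eq (w : List Char) :
    (pvCommaA (pvClean w)).filter (fun c => PySem.Chars.strIsalpha c) = pvEmitB w := by
  simp only [pvEmitB, pvClean]
  generalize PySem.Chars.replace _ [' '] [] = x
  rw [pvCommaA]
  by_cases hc : PySem.Chars.isIn [','] x = true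
  · rw [if_pos ((pv_count_pos_iff _ _ (by decide)).mpr hc), if_pos hc]
    by_cases hg : (PySem.Chars.endswith (PySem.List.pyGetD (PySem.Chars.splitOn x [',']) 1 []) ['a']
        || PySem.Chars.endswith (PySem.List.pyGetD (PySem.Chars.splitOn x [',']) 1 []) ['t','r','i','z']) = true
    · rw [if_pos hg, if_pos hg, pv_fem_eq _ _ hg]
    · rw [if_neg hg, if_neg hg]
  · rw [if_neg (fun hp => hc ((pv_count_pos_iff _ _ (by decide)).mp hp)), if_neg hc]

-- A's "res" equals B's "res" (the emission pass)
theorem pv_res_eq (lp : List (List Char)) :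
    (((((lp.foldl (fun acc p1 =>
        if 0 < PySem.Chars.find p1 ['1'] then acc ++ [PySem.Chars.replace p1 ['1'] []] else acc ++ [p1]) []).foldl
      (fun acc p2 =>
        if 0 < PySem.Chars.find p2 ['2'] then acc ++ [PySem.Chars.replace p2 ['2'] []] else acc ++ [p2]) []).foldl
      (fun acc ps => acc ++ [PySem.Chars.replace ps [' '] []]) []).foldl
      (fun acc pc => acc ++ pvCommaA pc) []).foldl
      (fun acc r => if PySem.Chars.strIsalpha r then acc ++ [r] else acc) [])
    = lp.flatMap pvEmitB := by
  have e1 : (fun (acc : List (List Char)) p1 =>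
      if 0 < PySem.Chars.find p1 ['1'] then acc ++ [PySem.Chars.replace p1 ['1'] []] else acc ++ [p1])
      = fun acc p1 => acc ++ [if 0 < PySem.Chars.find p1 ['1'] then PySem.Chars.replace p1 ['1'] [] else p1] := by
    funext acc p; split <;> rfl
  have e2 : (fun (acc : List (List Char)) p2 =>
      if 0 < PySem.Chars.find p2 ['2'] then acc ++ [PySem.Chars.replace p2 ['2'] []] else acc ++ [p2])
      = fun acc p2 => acc ++ [if 0 < PySem.Chars.find p2 ['2'] then PySem.Chars.replace p2 ['2'] [] else p2] := by
    funext acc p; split <;> rfl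
  rw [e1, PySem.List.foldl_append_singleton_eq_map, List.nil_append,
      e2, PySem.List.foldl_append_singleton_eq_map, List.nil_append,
      PySem.List.foldl_append_singleton_eq_map, List.nil_append,
      PySem.List.foldl_append_eq_flatMap, List.nil_append,
      PySem.List.foldl_append_if_eq_filter, List.nil_append]
  rw [List.map_map, List.map_map, List.filter_flatMap, List.flatMap_map]
  congr 1
  funext w
  exact pv_emit_eq w

-- the neighbor condition of A, on Nat indices
def pvCondA (res : List (List Char)) (k : Nat) : Bool :=
  decide (pvFirst res k = pvFirst res (k - 1)) || decide (pvFirst res k = pvFirst res (k + 1))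

-- pvRunEnd facts
theorem pvRunEnd_le (res : List (List Char)) (c : Char) (j : Nat) (h : j ≤ res.length) :
    pvRunEnd res c j ≤ res.length := by
  fun_induction pvRunEnd res c j with
  | case1 j h1 hc ih => exact ih (by omega)
  | case2 j h1 hc => omega
  | case3 j h1 => omega

theorem pvRunEnd_run (res : List (List Char)) (c : Char) (j : Nat) :
    ∀ k, j ≤ k → k < pvRunEnd res c j → pvFirst res k = c := by
  fun_induction pvRunEnd res c j with
  | case1 j h1 hc ih =>
    intro k hk1 hk2
    rcases Nat.eq_or_lt_of_le hk1 with rfl | hlt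
    · exact hc
    · exact ih k hlt hk2
  | case2 j h1 hc => intro k hk1 hk2; omega
  | case3 j h1 => intro k hk1 hk2; omega

theorem pvRunEnd_stop (res : List (List Char)) (c : Char) (j : Nat)
    (h : pvRunEnd res c j < res.length) : pvFirst res (pvRunEnd res c j) ≠ c := by
  fun_induction pvRunEnd res c j with
  | case1 j h1 hc ih => exact ih h
  | case2 j h1 hc => exact hc
  | case3 j h1 => omega

-- the run loop computes exactly A's filter over the tail segment starting at a run boundary
theorem pvRunsB_eq_filter (res : List (List Char)) :
    ∀ (fuel i : Nat), res.length - i ≤ fuel →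
    (i = 0 ∨ res.length ≤ i ∨ pvFirst res (i - 1) ≠ pvFirst res i) →
    pvRunsB res i
      = ((List.range' i (res.length - i)).filter
           (fun k => decide (0 < k) && decide (k < res.length - 1) && pvCondA res k)).map
          (fun k => res.getD k []) := by
  intro fuel
  induction fuel with
  | zero =>
    intro i hf hstart
    rw [pvRunsB, dif_neg (by omega)]
    rw [show res.length - i = 0 by omega]
    simp
  | succ n ih =>
    intro i hf hstart
    by_cases hi : i < res.length
    · rw [pvRunsB, dif_pos hi]
      have hj1 : i + 1 ≤ pvRunEnd res (pvFirst res i) (i + 1) := pvRunEnd_ge res _ (i + 1)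
      have hj2 : pvRunEnd res (pvFirst res i) (i + 1) ≤ res.length :=
        pvRunEnd_le res _ (i + 1) (by omega)
      set j := pvRunEnd res (pvFirst res i) (i + 1) with hjdef
      have hrun : ∀ k, i ≤ k → k < j → pvFirst res k = pvFirst res i := by
        intro k hk1 hk2
        rcases Nat.eq_or_lt_of_le hk1 with rfl | hlt
        · rfl
        · exact pvRunEnd_run res _ (i + 1) k hlt hk2
      have hstop : j < res.length → pvFirst res j ≠ pvFirst res i := fun hlt =>
        pvRunEnd_stop res _ (i + 1) hlt
      -- split the remaining index range at j
      have hsplit : List.range' i (res.length - i)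
          = List.range' i (j - i) ++ List.range' j (res.length - j) := by
        calc List.range' i (res.length - i)
            = List.range' i ((j - i) + (res.length - j)) := by
              rw [show res.length - i = (j - i) + (res.length - j) by omega]
          _ = List.range' i (j - i) ++ List.range' (i + 1 * (j - i)) (res.length - j) :=
              (List.range'_append).symm
          _ = List.range' i (j - i) ++ List.range' j (res.length - j) := by
              rw [show i + 1 * (j - i) = j by omega]
      rw [hsplit, List.filter_append, List.map_append]
      congr 1
      · -- the current run's contribution
        by_cases h2 : 2 ≤ j - i
        · rw [if_pos h2]
          congr 1
          apply List.filter_congr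
          intro k hk
          have hk' := List.mem_range'.mp hk
          have hcond : pvCondA res k = true := by
            unfold pvCondA
            by_cases hki : k = i
            · subst hki
              have : pvFirst res (k + 1) = pvFirst res k := by
                rw [hrun (k + 1) (by omega) (by omega), hrun k le_rfl (by omega)]
              simp [this]
            · have : pvFirst res (k - 1) = pvFirst res k := by
                rw [hrun (k - 1) (by omega) (by omega), hrun k (by omega) (by omega)]
              simp [this]
          rw [hcond, Bool.and_true]
        · rw [if_neg h2]
          have hji : j - i = 1 := by omega
          rw [hji]
          have hsing : List.range' i 1 = [i] := by simp
          rw [hsing]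
          by_cases hi0 : i = 0
          · subst hi0; simp
          · by_cases hilast : i = res.length - 1
            · simp [hilast]
            · have hL : pvFirst res (i - 1) ≠ pvFirst res i := by
                rcases hstart with h0 | h0 | h0
                · omega
                · omega
                · exact h0
              have hR : pvFirst res (i + 1) ≠ pvFirst res i := by
                have : i + 1 = j := by omega
                rw [this]
                exact hstop (by omega)
              have hcond : pvCondA res i = false := by
                unfold pvCondA
                simp only [Bool.or_eq_false_iff, decide_eq_false_iff_not]
                exact ⟨fun he => hL he.symm, fun he => hR he.symm⟩
              simp [hcond]
      · -- the remaining runs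
        exact ih j (by omega) (by
          by_cases hjlen : j < res.length
          · right; right
            intro he
            exact hstop hjlen (by rw [← he]; exact hrun (j - 1) (by omega) (by omega))
          · right; left; omega)
    · rw [pvRunsB, dif_neg hi]
      rw [show res.length - i = 0 by omega]
      simp

-- A's loop range [1, n-2] with bound conditions = B's full range with the bounds as filters
theorem pv_range_bounds (res : List (List Char)) :
    ((List.range' 0 res.length).filter
        (fun k => decide (0 < k) && decide (k < res.length - 1) && pvCondA res k)).map
      (fun k => res.getD k [])
    = ((List.range' 1 (res.length - 2)).filter (fun k => pvCondA res k)).map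
        (fun k => res.getD k []) := by
  rcases Nat.lt_or_ge res.length 2 with h2 | h2
  · rw [show res.length - 2 = 0 by omega]
    have hz : (List.range' 0 res.length).filter
        (fun k => decide (0 < k) && decide (k < res.length - 1) && pvCondA res k) = [] := by
      rcases (by omega : res.length = 0 ∨ res.length = 1) with h | h <;> rw [h]
      · rfl
      · simp [List.range']
    rw [hz]
    simp
  · have hsplit : List.range' 0 res.length
        = ([0] ++ List.range' 1 (res.length - 2)) ++ [res.length - 1] := by
      calc List.range' 0 res.length
          = List.range' 0 ((1 + (res.length - 2)) + 1) := by congr 1; omega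
        _ = List.range' 0 (1 + (res.length - 2)) ++ [0 + (1 + (res.length - 2))] :=
            List.range'_1_concat
        _ = (List.range' 0 1 ++ List.range' (0 + 1) (res.length - 2))
              ++ [0 + (1 + (res.length - 2))] := by rw [List.range'_append_1]
        _ = ([0] ++ List.range' 1 (res.length - 2)) ++ [res.length - 1] := by
            rw [show 0 + (1 + (res.length - 2)) = res.length - 1 by omega]
            simp [List.range']
    rw [hsplit, List.filter_append, List.filter_append]
    have hz : ([0] : List Nat).filter
        (fun k => decide (0 < k) && decide (k < res.length - 1) && pvCondA res k) = [] := by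
      simp
    have hl : ([res.length - 1] : List Nat).filter
        (fun k => decide (0 < k) && decide (k < res.length - 1) && pvCondA res k) = [] := by
      simp
    rw [hz, hl, List.nil_append, List.append_nil]
    congr 1
    apply List.filter_congr
    intro k hk
    obtain ⟨v, hv, rfl⟩ := List.mem_range'.mp hk
    have h1 : decide (0 < 1 + 1 * v) = true := decide_eq_true (by omega)
    have h2' : decide (1 + 1 * v < res.length - 1) = true := decide_eq_true (by omega)
    rw [h1, h2', Bool.true_and, Bool.true_and]

-- A's coladas foldl equals B's run loop
theorem pv_coladas_eq (res : List (List Char)) :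
    (PySem.List.pyRange 1 (PySem.List.len res - 1) 1).foldl (fun acc i =>
      if PySem.List.pyGetD (PySem.List.pyGetD res i []) 0 ' '
           = PySem.List.pyGetD (PySem.List.pyGetD res (i - 1) []) 0 ' '
         ∨ PySem.List.pyGetD (PySem.List.pyGetD res i []) 0 ' '
           = PySem.List.pyGetD (PySem.List.pyGetD res (i + 1) []) 0 ' '
      then acc ++ [PySem.List.pyGetD res i []] else acc) []
    = pvRunsB res 0 := by
  rw [PySem.List.foldl_append_ite, List.nil_append]
  rw [pvRunsB_eq_filter res res.length 0 (by omega) (Or.inl rfl), Nat.sub_zero,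
      pv_range_bounds]
  rw [PySem.List.pyRange_one, List.range'_eq_map_range]
  have hn : ((PySem.List.len res - 1) - 1).toNat = res.length - 2 := by
    simp [PySem.List.len_eq]
    omega
  rw [hn, List.filter_map, List.filter_map, List.map_map, List.map_map]
  have hfirst : ∀ m : Nat, PySem.List.pyGetD (PySem.List.pyGetD res ((m : Nat) : Int) []) 0 ' '
      = pvFirst res m := by
    intro m
    rw [PySem.List.pyGetD_natCast, PySem.List.pyGetD_zero, pvFirst]
    cases res.getD m [] <;> simp [List.getD]
  have harg : ∀ k : Nat, (1 : Int) + (k : Int) = ((1 + k : Nat) : Int) := by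
    intro k; push_cast; ring
  congr 1
  · funext k
    simp only [Function.comp_apply]
    rw [harg, PySem.List.pyGetD_natCast]
  · congr 1
    funext k
    simp only [Function.comp_apply]
    rw [harg]
    have hm1 : ((1 + k : Nat) : Int) - 1 = ((k : Nat) : Int) := by push_cast; ring
    have hp1 : ((1 + k : Nat) : Int) + 1 = ((1 + k + 1 : Nat) : Int) := by push_cast; ring
    rw [hm1, hp1, hfirst, hfirst, hfirst]
    unfold pvCondA
    rw [show 1 + k - 1 = k by omega]
    by_cases hA : pvFirst res (1 + k) = pvFirst res k <;>
      by_cases hB : pvFirst res (1 + k) = pvFirst res (1 + k + 1) <;>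
        simp [hA, hB]

-- ===== VERDICT (by name: the statement is the Claim_ definition above) =====
theorem limpiar_lista_spec : Claim_equal_limpiar_lista := by
  intro lista_palabras _ _
  unfold Spec_limpiar_lista
  simp only [limpiar_lista, limpiar_lista_alt]
  rw [pv_res_eq, pv_coladas_eq]
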